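-- pv_equiv track=rewrite | github.com/thangcao183/mxltools | d2editor/property_adder.py | find_all_end_markers
-- ===== SOURCE A (Python) =====
-- from typing import List, Dict, Tuple, Optional
--
-- def find_all_end_markers(bitstring: str) -> List[int]:
--     """Find all positions of end marker (111111111) in bitstring"""
--     positions = []
--     end_marker = "111111111"
--     pos = 0
--     while True:
--         pos = bitstring.find(end_marker, pos)
--         if pos == -1:
--             break
--         positions.append(pos)
--         pos += 1
--     return positions
-- ===== SOURCE B (Python) =====
-- from typing import List
--
-- def find_all_end_markers(bitstring: str) -> List[int]:
--     """Find all positions of end marker (111111111) in bitstring.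
--
--     Single linear pass: maintain the length of the current run of '1's;
--     whenever the run reaches 9 or more, a marker starts 8 chars back.
--     """
--     positions = []
--     run = 0
--     for i, ch in enumerate(bitstring):
--         run = run + 1 if ch == '1' else 0
--         if run >= 9:
--             positions.append(i - 8)
--     return positions
-- ===== Notes on version B (the rewrite author's own statement) =====
-- stated objective: alternative
-- what changed: Replaced the repeated str.find rescans with a single run-length pass that counts consecutive '1's and emits i-8 whenever the run reaches 9.
import Mathlib
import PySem

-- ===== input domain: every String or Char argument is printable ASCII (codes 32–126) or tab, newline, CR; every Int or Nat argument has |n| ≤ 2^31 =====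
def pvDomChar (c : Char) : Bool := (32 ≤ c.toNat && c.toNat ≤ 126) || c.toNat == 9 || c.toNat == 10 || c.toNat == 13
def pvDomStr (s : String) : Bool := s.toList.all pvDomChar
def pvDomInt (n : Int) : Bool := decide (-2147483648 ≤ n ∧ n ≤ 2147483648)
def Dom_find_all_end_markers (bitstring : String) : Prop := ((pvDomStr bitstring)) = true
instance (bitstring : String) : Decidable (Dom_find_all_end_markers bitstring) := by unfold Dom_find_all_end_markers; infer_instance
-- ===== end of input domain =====

-- B replaces A's repeated str.find rescans by one linear run-length pass over the characters (alternative algorithm, same results).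

-- ===== PORT A =====
-- the constant end_marker = "111111111"
def pvMarker : List Char := "111111111".toList

-- A's 'while True' loop; pos strictly increases each round, so length+1 rounds of fuel always suffice.
def pvLoopA (s : List Char) : Nat → Int → List Int → List Int
  | 0, _, acc => acc
  | fuel+1, pos, acc =>
    let p := PySem.Chars.findFrom s pvMarker pos
    if p = -1 then acc
    else pvLoopA s fuel (p + 1) (acc ++ [p])

def find_all_end_markers (bitstring : String) : List Int :=
  pvLoopA bitstring.toList (bitstring.toList.length + 1) 0 []

-- ===== PORT B =====
-- run-length scan: for i, ch in enumerate(bitstring): run = run+1 if ch=='1' else 0; if run>=9: append i-8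
def find_all_end_markers_alt (bitstring : String) : List Int :=
  ((PySem.List.enumerate bitstring.toList).foldl
    (fun (st : Nat × List Int) ic =>
      let run := if ic.2 = '1' then st.1 + 1 else 0
      (run, if 9 ≤ run then st.2 ++ [ic.1 - 8] else st.2))
    (0, [])).2

-- ===== PRECONDITION & SPEC =====
def Spec_find_all_end_markers (bitstring : String) (out : List Int) : Prop := out = find_all_end_markers_alt bitstring
instance (bitstring : String) (out : List Int) : Decidable (Spec_find_all_end_markers bitstring out) := by unfold Spec_find_all_end_markers; infer_instance

-- ===== CLAIM (what is proved, stated in full; the proofs are below) =====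
def Claim_equal_find_all_end_markers : Prop := ∀ (bitstring : String), Dom_find_all_end_markers bitstring → Spec_find_all_end_markers bitstring (find_all_end_markers bitstring)

-- ===== LEMMAS AND PROOFS =====

-- common characterization: the increasing list of all i with pvMarker a prefix of s.drop i
def pvOk (s : List Char) (i : Nat) : Bool := decide (pvMarker <+: s.drop i)
def pvTarget (s : List Char) : List Int :=
  ((List.range s.length).filter (pvOk s)).map (fun i => (i : Int))
-- length of the maximal run of '1' at the end of s
def pvRun (s : List Char) : Nat := (s.reverse.takeWhile (· == '1')).length

theorem pvMarker_eq : pvMarker = List.replicate 9 '1' := by decide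

theorem pvOk_false_of_large {s : List Char} {i : Nat} (h : s.length < i + 9) :
    pvOk s i = false := by
  simp only [pvOk, decide_eq_false_iff_not]
  intro hp
  have := hp.length_le
  simp [pvMarker_eq] at this
  omega

theorem pvOk_true_iff {s : List Char} {i : Nat} :
    pvOk s i = true ↔ pvMarker <+: s.drop i := by simp [pvOk]

-- A-side loop invariant
theorem pvLoopA_eq (s : List Char) :
    ∀ (fuel : Nat) (pos : Nat) (acc : List Int), pos ≤ s.length → s.length + 1 ≤ fuel + pos →
      pvLoopA s fuel (pos : Int) acc
        = acc ++ (((List.range' pos (s.length - pos)).filter (pvOk s)).map (fun i => (i : Int))) := by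
  intro fuel
  induction fuel with
  | zero => intro pos acc h1 h2; omega
  | succ fuel ih =>
    intro pos acc h1 h2
    simp only [pvLoopA]
    by_cases hp : PySem.Chars.findFrom s pvMarker (pos : Int) = -1
    · rw [if_pos hp]
      have hno : ¬ pvMarker <:+: s.drop pos :=
        (PySem.Chars.findFrom_natCast_eq_neg_one_iff s pvMarker pos h1).mp hp
      have hfil : (List.range' pos (s.length - pos)).filter (pvOk s) = [] := by
        rw [List.filter_eq_nil_iff]
        intro i hi
        have hi' : pos ≤ i ∧ i < pos + (s.length - pos) := List.mem_range'_1.mp hi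
        simp only [pvOk, decide_eq_true_eq]
        intro hpre
        apply hno
        rw [← PySem.Chars.isIn_iff_infix]
        rw [← PySem.Chars.exists_prefix_drop_iff_isIn]
        refine ⟨i - pos, ?_⟩
        rw [List.drop_drop, show pos + (i - pos) = i from by omega]
        exact hpre
      simp [hfil]
    · rw [if_neg hp]
      obtain ⟨hge, hpre, hmin⟩ := PySem.Chars.findFrom_natCast_spec s pvMarker pos h1 hp
      have hp0 : (0:Int) ≤ PySem.Chars.findFrom s pvMarker (pos : Int) :=
        le_trans (Int.natCast_nonneg pos) hge
      have hpq : PySem.Chars.findFrom s pvMarker (pos : Int)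
          = (((PySem.Chars.findFrom s pvMarker (pos : Int)).toNat : Nat) : Int) :=
        (Int.toNat_of_nonneg hp0).symm
      generalize hq : (PySem.Chars.findFrom s pvMarker (pos : Int)).toNat = q at hpre hmin hpq
      have hposq : pos ≤ q := by omega
      have hlen9 : q + 9 ≤ s.length := by
        have := hpre.length_le
        simp [pvMarker_eq] at this
        omega
      -- split the range at q
      have hsplit : List.range' pos (s.length - pos)
          = List.range' pos (q - pos) ++ List.range' q (s.length - q) := by
        calc List.range' pos (s.length - pos)
            = List.range' pos ((q - pos) + (s.length - q)) := by
              rw [show s.length - pos = (q - pos) + (s.length - q) from by omega]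
          _ = List.range' pos (q - pos) ++ List.range' (pos + 1 * (q - pos)) (s.length - q) :=
              List.range'_append.symm
          _ = List.range' pos (q - pos) ++ List.range' q (s.length - q) := by
              rw [show pos + 1 * (q - pos) = q from by omega]
      have hfil1 : (List.range' pos (q - pos)).filter (pvOk s) = [] := by
        rw [List.filter_eq_nil_iff]
        intro i hi
        have hi' : pos ≤ i ∧ i < pos + (q - pos) := List.mem_range'_1.mp hi
        simp only [pvOk, decide_eq_true_eq]
        exact hmin i hi'.1 (by omega)
      have hcons : List.range' q (s.length - q) = q :: List.range' (q+1) (s.length - q - 1) := by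
        rw [show s.length - q = (s.length - q - 1) + 1 from by omega, List.range'_succ]
        rw [show s.length - q - 1 + 1 - 1 = s.length - q - 1 from by omega]
      have hokq : pvOk s q = true := pvOk_true_iff.mpr hpre
      have hrec := ih (q + 1) (acc ++ [((q : Nat) : Int)]) (by omega) (by omega)
      rw [hpq, show ((q : Nat) : Int) + 1 = ((q + 1 : Nat) : Int) from by push_cast; ring,
        hrec, hsplit, List.filter_append, hfil1, hcons,
        show s.length - (q + 1) = s.length - q - 1 from by omega]
      simp [hokq]

theorem findA_eq_target (s : List Char) :
    pvLoopA s (s.length + 1) 0 [] = pvTarget s := by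
  have h := pvLoopA_eq s (s.length + 1) 0 [] (Nat.zero_le _) (by omega)
  simpa [pvTarget, List.range_eq_range'] using h

-- B-side lemmas
theorem pvRun_append (t : List Char) (c : Char) :
    pvRun (t ++ [c]) = if c = '1' then pvRun t + 1 else 0 := by
  simp only [pvRun, List.reverse_append, List.reverse_singleton, List.singleton_append,
    List.takeWhile_cons]
  by_cases hc : c = '1' <;> simp [hc]

theorem pvRun_le (t : List Char) : pvRun t ≤ t.length := by
  have := (List.takeWhile_prefix (l := t.reverse) (p := (· == '1'))).length_le
  simpa [pvRun] using this

-- k ≤ run of a at the head of l  ↔  the first k elements are all a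
theorem takeWhile_len_iff {l : List Char} {a : Char} :
    ∀ {k : Nat}, k ≤ l.length →
      (k ≤ (l.takeWhile (· == a)).length ↔ l.take k = List.replicate k a) := by
  induction l with
  | nil =>
    intro k hk
    have hk0 : k = 0 := by simpa using hk
    subst hk0
    simp
  | cons x xs ih =>
    intro k hk
    cases k with
    | zero => simp
    | succ j =>
      by_cases hx : x = a
      · subst hx
        simp only [List.takeWhile_cons, beq_self_eq_true, if_true, List.length_cons,
          List.take_succ_cons, List.replicate_succ, List.cons.injEq, true_and]
        rw [← ih (k := j) (by simpa using hk)]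
        omega
      · have hbx : (x == a) = false := by simp [hx]
        simp only [List.takeWhile_cons, hbx]
        simp only [Bool.false_eq_true, if_false, List.length_nil,
          List.take_succ_cons, List.replicate_succ, List.cons.injEq]
        constructor
        · omega
        · rintro ⟨h1, -⟩
          exact absurd h1 hx

-- marker at position u.length - 9 ↔ trailing run of ones ≥ 9
theorem pvOk_last_iff {u : List Char} (h9 : 9 ≤ u.length) :
    (pvOk u (u.length - 9) = true ↔ 9 ≤ pvRun u) := by
  have hlen : (u.drop (u.length - 9)).length = 9 := by
    simp [List.length_drop]; omega
  have htake : List.take pvMarker.length (u.drop (u.length - 9)) = u.drop (u.length - 9) :=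
    List.take_of_length_le (by rw [hlen]; simp [pvMarker_eq])
  have h1 : pvOk u (u.length - 9) = true ↔ u.drop (u.length - 9) = List.replicate 9 '1' := by
    rw [pvOk_true_iff, List.prefix_iff_eq_take, htake, pvMarker_eq]
    exact eq_comm
  have h2 : u.drop (u.length - 9) = List.replicate 9 '1' ↔ u.reverse.take 9 = List.replicate 9 '1' := by
    rw [List.take_reverse]
    constructor
    · intro h; rw [h]; simp
    · intro h
      have := congrArg List.reverse h
      simpa using this
  have h3 := takeWhile_len_iff (l := u.reverse) (a := '1') (k := 9) (by simpa using h9)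
  rw [h1, h2, ← h3]
  simp [pvRun]

-- appending a char does not change the marker test at positions fully inside t
theorem pvOk_append {t : List Char} {c : Char} {i : Nat} (h : i + 9 ≤ t.length) :
    pvOk (t ++ [c]) i = pvOk t i := by
  simp only [pvOk]
  rw [List.drop_append_of_le_length (by omega)]
  have hl : 9 ≤ (t.drop i).length := by simp [List.length_drop]; omega
  congr 1
  rw [List.prefix_iff_eq_take, List.prefix_iff_eq_take]
  rw [List.take_append_of_le_length (by simp [pvMarker_eq]; omega)]

theorem pvTarget_append (t : List Char) (c : Char) :
    pvTarget (t ++ [c])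
      = if 9 ≤ pvRun (t ++ [c]) then pvTarget t ++ [(t.length : Int) - 8] else pvTarget t := by
  have hlen : (t ++ [c]).length = t.length + 1 := by simp
  by_cases hbig : 8 ≤ t.length
  · have hr1 : List.range (t.length + 1)
        = List.range' 0 (t.length - 8) ++ List.range' (t.length - 8) 9 := by
      rw [List.range_eq_range']
      calc List.range' 0 (t.length + 1)
          = List.range' 0 ((t.length - 8) + 9) := by
            rw [show t.length + 1 = (t.length - 8) + 9 from by omega]
        _ = List.range' 0 (t.length - 8) ++ List.range' (0 + 1 * (t.length - 8)) 9 :=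
            List.range'_append.symm
        _ = List.range' 0 (t.length - 8) ++ List.range' (t.length - 8) 9 := by
            rw [show 0 + 1 * (t.length - 8) = t.length - 8 from by omega]
    have hr2 : List.range t.length
        = List.range' 0 (t.length - 8) ++ List.range' (t.length - 8) 8 := by
      rw [List.range_eq_range']
      calc List.range' 0 t.length
          = List.range' 0 ((t.length - 8) + 8) := by
            congr 1
            omega
        _ = List.range' 0 (t.length - 8) ++ List.range' (0 + 1 * (t.length - 8)) 8 :=
            List.range'_append.symm
        _ = List.range' 0 (t.length - 8) ++ List.range' (t.length - 8) 8 := by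
            rw [show 0 + 1 * (t.length - 8) = t.length - 8 from by omega]
    have hfc : (List.range' 0 (t.length - 8)).filter (pvOk (t ++ [c]))
        = (List.range' 0 (t.length - 8)).filter (pvOk t) := by
      apply List.filter_congr
      intro i hi
      have hi' : 0 ≤ i ∧ i < 0 + (t.length - 8) := List.mem_range'_1.mp hi
      exact pvOk_append (by omega)
    have hft : (List.range' (t.length - 8) 8).filter (pvOk t) = [] := by
      rw [List.filter_eq_nil_iff]
      intro i hi
      have hi' : t.length - 8 ≤ i ∧ i < t.length - 8 + 8 := List.mem_range'_1.mp hi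
      simp [pvOk_false_of_large (s := t) (i := i) (by omega)]
    have hfu : (List.range' (t.length - 8) 9).filter (pvOk (t ++ [c]))
        = if 9 ≤ pvRun (t ++ [c]) then [t.length - 8] else [] := by
      have hsplit : List.range' (t.length - 8) 9
          = (t.length - 8) :: List.range' (t.length - 7) 8 := by
        rw [List.range'_succ, show t.length - 8 + 1 = t.length - 7 from by omega]
      have hrest : (List.range' (t.length - 7) 8).filter (pvOk (t ++ [c])) = [] := by
        rw [List.filter_eq_nil_iff]
        intro i hi
        have hi' : t.length - 7 ≤ i ∧ i < t.length - 7 + 8 := List.mem_range'_1.mp hi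
        have hbound : (t ++ [c]).length < i + 9 := by rw [hlen]; omega
        simp [pvOk_false_of_large hbound]
      have hd : t.length - 8 = (t ++ [c]).length - 9 := by rw [hlen]; omega
      rw [hsplit, List.filter_cons, hrest]
      by_cases hrun : 9 ≤ pvRun (t ++ [c])
      · have := (pvOk_last_iff (u := t ++ [c]) (by rw [hlen]; omega)).mpr hrun
        rw [← hd] at this
        simp [this, hrun]
      · have hok : pvOk (t ++ [c]) (t.length - 8) = false := by
          rw [hd, Bool.eq_false_iff]
          intro hcontra
          exact hrun ((pvOk_last_iff (u := t ++ [c]) (by rw [hlen]; omega)).mp hcontra)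
        simp [hok, hrun]
    have hcast : ((t.length - 8 : Nat) : Int) = (t.length : Int) - 8 := by omega
    rw [pvTarget, pvTarget, hlen, hr1, hr2, List.filter_append, List.filter_append,
      hfc, hft, hfu]
    by_cases hrun : 9 ≤ pvRun (t ++ [c]) <;> simp [hrun, hcast]
  · have hrun : ¬ 9 ≤ pvRun (t ++ [c]) := by
      have := pvRun_le (t ++ [c])
      rw [hlen] at this
      omega
    have h1 : pvTarget (t ++ [c]) = [] := by
      rw [pvTarget]
      have hf : (List.range (t ++ [c]).length).filter (pvOk (t ++ [c])) = [] := by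
        rw [List.filter_eq_nil_iff]
        intro i hi
        have hbound : (t ++ [c]).length < i + 9 := by rw [hlen]; omega
        simp [pvOk_false_of_large hbound]
      rw [hf]
      simp
    have h2 : pvTarget t = [] := by
      rw [pvTarget]
      have hf : (List.range t.length).filter (pvOk t) = [] := by
        rw [List.filter_eq_nil_iff]
        intro i hi
        simp [pvOk_false_of_large (s := t) (i := i) (by omega)]
      rw [hf]
      simp
    simp [h1, h2, hrun]

theorem pvFoldB (t : List Char) :
    (PySem.List.enumerate t 0).foldl
      (fun (st : Nat × List Int) ic =>
        let run := if ic.2 = '1' then st.1 + 1 else 0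
        (run, if 9 ≤ run then st.2 ++ [ic.1 - 8] else st.2))
      (0, []) = (pvRun t, pvTarget t) := by
  induction t using List.reverseRecOn with
  | nil => simp [PySem.List.enumerate_nil, pvRun, pvTarget]
  | append_singleton t c ih =>
    rw [PySem.List.enumerate_append, List.foldl_append, ih]
    have hone : PySem.List.enumerate [c] (0 + (t.length : Int)) = [((t.length : Int), c)] := by
      simp [PySem.List.enumerate_cons, PySem.List.enumerate_nil]
    rw [hone]
    simp only [List.foldl_cons, List.foldl_nil]
    rw [pvTarget_append, pvRun_append]

theorem findB_eq_target (bitstring : String) :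
    find_all_end_markers_alt bitstring = pvTarget bitstring.toList := by
  unfold find_all_end_markers_alt
  rw [pvFoldB]

-- ===== VERDICT (by name: the statement is the Claim_ definition above) =====
theorem find_all_end_markers_spec : Claim_equal_find_all_end_markers := by
  intro bitstring _
  unfold Spec_find_all_end_markers
  rw [findB_eq_target]
  unfold find_all_end_markers
  rw [findA_eq_target]
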